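-- pv_equiv track=rewrite | github.com/luckybob34/phaylanx | tools/proposals/parse_rfp.py | _is_mandatory
-- ===== SOURCE A (Python) =====
-- def _is_mandatory(text: str) -> bool:
--     """Heuristic: does this look like a mandatory requirement?"""
--     text_lower = text.lower()
--     mandatory_signals = [
--         "shall", "must", "required", "mandatory", "minimum",
--         "will not be considered", "failure to", "prerequisite",
--     ]
--     optional_signals = [
--         "may", "optional", "preferred", "desirable", "nice to have",
--         "bonus", "should", "encouraged",
--     ]
--     mandatory_score = sum(1 for s in mandatory_signals if s in text_lower)
--     optional_score = sum(1 for s in optional_signals if s in text_lower)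
--     return mandatory_score > optional_score
-- ===== SOURCE B (Python) =====
-- _WEIGHTS = {
--     "shall": 1, "must": 1, "required": 1, "mandatory": 1, "minimum": 1,
--     "will not be considered": 1, "failure to": 1, "prerequisite": 1,
--     "may": -1, "optional": -1, "preferred": -1, "desirable": -1,
--     "nice to have": -1, "bonus": -1, "should": -1, "encouraged": -1,
-- }
--
-- # Dispatch table: first character -> the signal phrases starting with it.
-- _BY_FIRST = {}
-- for _p in _WEIGHTS:
--     _BY_FIRST.setdefault(_p[0], []).append(_p)
--
-- def _is_mandatory(text: str) -> bool:
--     """Heuristic: does this look like a mandatory requirement?"""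
--     t = text.lower()
--     found = set()
--     for i in range(len(t)):
--         for p in _BY_FIRST.get(t[i], ()):
--             if p not in found and t.startswith(p, i):
--                 found.add(p)
--     return sum(w for p, w in _WEIGHTS.items() if p in found) > 0
-- ===== Notes on version B (the rewrite author's own statement) =====
-- stated objective: alternative
-- what changed: Instead of A's phrase-driven passes that test each keyword against the whole text and compare two counts, B makes one left-to-right scan of the text, dispatching at each position through a first-character bucket table to collect the set of signal phrases that occur, then sums their +1/-1 weights from a single weight dict.
import Mathlib
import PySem

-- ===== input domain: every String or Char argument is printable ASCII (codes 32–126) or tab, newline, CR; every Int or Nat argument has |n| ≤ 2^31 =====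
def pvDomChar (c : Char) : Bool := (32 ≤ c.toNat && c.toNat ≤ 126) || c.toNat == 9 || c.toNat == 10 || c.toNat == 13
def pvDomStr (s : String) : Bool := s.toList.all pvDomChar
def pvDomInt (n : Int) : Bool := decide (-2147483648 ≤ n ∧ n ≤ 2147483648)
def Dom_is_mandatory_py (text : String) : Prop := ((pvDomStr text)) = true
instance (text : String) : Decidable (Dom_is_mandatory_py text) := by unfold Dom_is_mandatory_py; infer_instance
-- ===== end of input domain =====

-- B replaces A's phrase-driven count-and-compare passes with a single left-to-right scan of the
-- text using a first-character dispatch table that collects the set of signal phrases found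
-- (alternative algorithm, same asymptotic cost).

-- ===== PORT A =====
def is_mandatory_py (text : String) : Bool :=
  let text_lower := PySem.Str.lower text
  let mandatory_signals : List String :=
    ["shall", "must", "required", "mandatory", "minimum",
     "will not be considered", "failure to", "prerequisite"]
  let optional_signals : List String :=
    ["may", "optional", "preferred", "desirable", "nice to have",
     "bonus", "should", "encouraged"]
  let mandatory_score : Int :=
    mandatory_signals.foldl (fun acc s => if PySem.Str.isIn s text_lower then acc + 1 else acc) 0
  let optional_score : Int :=
    optional_signals.foldl (fun acc s => if PySem.Str.isIn s text_lower then acc + 1 else acc) 0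
  decide (mandatory_score > optional_score)

-- ===== PORT B =====
-- Source B's module constant _WEIGHTS (dict, insertion order)
def weightsItems : List (String × Int) :=
  [("shall", 1), ("must", 1), ("required", 1), ("mandatory", 1),
   ("minimum", 1), ("will not be considered", 1), ("failure to", 1),
   ("prerequisite", 1),
   ("may", -1), ("optional", -1), ("preferred", -1), ("desirable", -1),
   ("nice to have", -1), ("bonus", -1), ("should", -1), ("encouraged", -1)]

-- Source B's module constant _BY_FIRST (computed once from _WEIGHTS by the setdefault loop;
-- transcribed here as its resulting value: bucket lists keep _WEIGHTS insertion order)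
def byFirst (c : Char) : List String :=
  if c = 's' then ["shall", "should"]
  else if c = 'm' then ["must", "mandatory", "minimum", "may"]
  else if c = 'r' then ["required"]
  else if c = 'w' then ["will not be considered"]
  else if c = 'f' then ["failure to"]
  else if c = 'p' then ["prerequisite", "preferred"]
  else if c = 'o' then ["optional"]
  else if c = 'd' then ["desirable"]
  else if c = 'n' then ["nice to have"]
  else if c = 'b' then ["bonus"]
  else if c = 'e' then ["encouraged"]
  else []

-- Source B's 'for i in range(len(t))' loop: structural recursion over the suffixes of t;
-- t.startswith(p, i) is p.toList.isPrefixOf (the suffix starting at i) — exact for these chars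
def scanPos : List Char → PySem.Set String → PySem.Set String
  | [], found => found
  | c :: rest, found =>
      scanPos rest
        ((byFirst c).foldl
          (fun f p => if p ∉ f ∧ p.toList.isPrefixOf (c :: rest) then f.add p else f) found)

def is_mandatory_py_alt (text : String) : Bool :=
  let t := PySem.Str.lower text
  let found := scanPos t.toList (PySem.Set.ofList [])
  let net : Int :=
    weightsItems.foldl (fun acc pw => if pw.1 ∈ found then acc + pw.2 else acc) 0
  decide (net > 0)

-- ===== PRECONDITION & SPEC =====
def Spec_is_mandatory_py (text : String) (out : Bool) : Prop := out = is_mandatory_py_alt text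
instance (text : String) (out : Bool) : Decidable (Spec_is_mandatory_py text out) := by unfold Spec_is_mandatory_py; infer_instance

-- ===== CLAIM =====
def Claim_equal_is_mandatory_py : Prop := ∀ (text : String), Dom_is_mandatory_py text → Spec_is_mandatory_py text (is_mandatory_py text)

-- ===== LEMMAS AND PROOFS =====

theorem mem_foldl_addIf (t : List Char) (ps : List String) (found : PySem.Set String) (p : String) :
    (p ∈ ps.foldl (fun f q => if q ∉ f ∧ q.toList.isPrefixOf t then f.add q else f) found)
      ↔ p ∈ found ∨ (p ∈ ps ∧ p.toList.isPrefixOf t = true) := by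
  induction ps generalizing found with
  | nil => simp
  | cons q qs ih =>
    simp only [List.foldl_cons, ih]
    by_cases hpq : p = q
    · subst hpq
      split_ifs with hq
      · simp only [PySem.Set.mem_add, List.mem_cons]
        tauto
      · rw [not_and] at hq
        simp only [List.mem_cons]
        constructor
        · tauto
        · rintro (h | ⟨h1, h2⟩)
          · exact Or.inl h
          · rcases h1 with h1 | h1
            · by_cases hf : p ∈ found
              · exact Or.inl hf
              · exact absurd h2 (hq hf)
            · exact Or.inr ⟨h1, h2⟩
    · split_ifs with hq
      · simp only [PySem.Set.mem_add, List.mem_cons]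
        tauto
      · simp only [List.mem_cons]
        tauto

theorem mem_scanPos (p : String) (c0 : Char) (hhead : p.toList.head? = some c0)
    (hmem : p ∈ byFirst c0) (l : List Char) :
    ∀ found, p ∈ scanPos l found ↔ p ∈ found ∨ p.toList <:+: l := by
  have hne : p.toList ≠ [] := by
    intro h; rw [h] at hhead; simp at hhead
  obtain ⟨tl, hpl⟩ : ∃ tl, p.toList = c0 :: tl := by
    cases hpc : p.toList with
    | nil => exact absurd hpc hne
    | cons a tl => rw [hpc] at hhead; simp at hhead; exact ⟨tl, by rw [hhead]⟩
  induction l with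
  | nil =>
    intro found
    simp only [scanPos, List.infix_nil]
    simp [hne]
  | cons c rest ih =>
    intro found
    rw [scanPos, ih, mem_foldl_addIf, List.infix_cons_iff]
    have hpref : (p.toList <+: c :: rest) → c = c0 := by
      intro h
      rw [hpl] at h
      exact (List.cons_prefix_cons.mp h).1.symm
    rw [List.isPrefixOf_iff_prefix]
    constructor
    · rintro ((h | ⟨_, h2⟩) | h)
      · exact Or.inl h
      · exact Or.inr (Or.inl h2)
      · exact Or.inr (Or.inr h)
    · rintro (h | h | h)
      · exact Or.inl (Or.inl h)
      · exact Or.inl (Or.inr ⟨(hpref h) ▸ hmem, h⟩)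
      · exact Or.inr h

theorem found_iff_isIn (text : String) (p : String) (c0 : Char)
    (hhead : p.toList.head? = some c0) (hmem : p ∈ byFirst c0) :
    (p ∈ scanPos (PySem.Str.lower text).toList (PySem.Set.ofList []))
      ↔ PySem.Str.isIn p (PySem.Str.lower text) = true := by
  rw [mem_scanPos p c0 hhead hmem, PySem.Str.isIn_iff_infix]
  simp

theorem ite_add_split (b : Bool) (x k : Int) :
    (if b then x + k else x) = x + (if b then k else 0) := by
  cases b <;> simp

theorem ite_neg_one (b : Bool) :
    (if b then (-1 : Int) else 0) = -(if b then 1 else 0) := by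
  cases b <;> simp

-- ===== VERDICT =====
theorem is_mandatory_py_spec : Claim_equal_is_mandatory_py := by
  intro text _
  have h1 := found_iff_isIn text "shall" 's' (by decide) (by decide)
  have h2 := found_iff_isIn text "must" 'm' (by decide) (by decide)
  have h3 := found_iff_isIn text "required" 'r' (by decide) (by decide)
  have h4 := found_iff_isIn text "mandatory" 'm' (by decide) (by decide)
  have h5 := found_iff_isIn text "minimum" 'm' (by decide) (by decide)
  have h6 := found_iff_isIn text "will not be considered" 'w' (by decide) (by decide)
  have h7 := found_iff_isIn text "failure to" 'f' (by decide) (by decide)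
  have h8 := found_iff_isIn text "prerequisite" 'p' (by decide) (by decide)
  have h9 := found_iff_isIn text "may" 'm' (by decide) (by decide)
  have h10 := found_iff_isIn text "optional" 'o' (by decide) (by decide)
  have h11 := found_iff_isIn text "preferred" 'p' (by decide) (by decide)
  have h12 := found_iff_isIn text "desirable" 'd' (by decide) (by decide)
  have h13 := found_iff_isIn text "nice to have" 'n' (by decide) (by decide)
  have h14 := found_iff_isIn text "bonus" 'b' (by decide) (by decide)
  have h15 := found_iff_isIn text "should" 's' (by decide) (by decide)
  have h16 := found_iff_isIn text "encouraged" 'e' (by decide) (by decide)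
  unfold Spec_is_mandatory_py is_mandatory_py is_mandatory_py_alt weightsItems
  simp only [List.foldl_cons, List.foldl_nil,
    h1, h2, h3, h4, h5, h6, h7, h8, h9, h10, h11, h12, h13, h14, h15, h16,
    ite_add_split, ite_neg_one, decide_eq_decide]
  generalize (if PySem.Str.isIn "shall" (PySem.Str.lower text) then (1:Int) else 0) = a1
  generalize (if PySem.Str.isIn "must" (PySem.Str.lower text) then (1:Int) else 0) = a2
  generalize (if PySem.Str.isIn "required" (PySem.Str.lower text) then (1:Int) else 0) = a3
  generalize (if PySem.Str.isIn "mandatory" (PySem.Str.lower text) then (1:Int) else 0) = a4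
  generalize (if PySem.Str.isIn "minimum" (PySem.Str.lower text) then (1:Int) else 0) = a5
  generalize (if PySem.Str.isIn "will not be considered" (PySem.Str.lower text) then (1:Int) else 0) = a6
  generalize (if PySem.Str.isIn "failure to" (PySem.Str.lower text) then (1:Int) else 0) = a7
  generalize (if PySem.Str.isIn "prerequisite" (PySem.Str.lower text) then (1:Int) else 0) = a8
  generalize (if PySem.Str.isIn "may" (PySem.Str.lower text) then (1:Int) else 0) = b1
  generalize (if PySem.Str.isIn "optional" (PySem.Str.lower text) then (1:Int) else 0) = b2
  generalize (if PySem.Str.isIn "preferred" (PySem.Str.lower text) then (1:Int) else 0) = b3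
  generalize (if PySem.Str.isIn "desirable" (PySem.Str.lower text) then (1:Int) else 0) = b4
  generalize (if PySem.Str.isIn "nice to have" (PySem.Str.lower text) then (1:Int) else 0) = b5
  generalize (if PySem.Str.isIn "bonus" (PySem.Str.lower text) then (1:Int) else 0) = b6
  generalize (if PySem.Str.isIn "should" (PySem.Str.lower text) then (1:Int) else 0) = b7
  generalize (if PySem.Str.isIn "encouraged" (PySem.Str.lower text) then (1:Int) else 0) = b8
  omega
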